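-- pv_equiv track=rewrite | github.com/Pranavsingh431/Inceptia_ai | smart_scraper.py | _is_blocked_content
-- ===== SOURCE A (Python) =====
-- def _is_blocked_content(content: str) -> bool:
--     """Detect if page is showing anti-bot protection"""
--     blocked_indicators = [
--         "cloudflare",
--         "access denied",
--         "checking your browser",
--         "enable javascript and cookies",
--         "request could not be satisfied",
--         "ray id:",
--         "security check",
--         "bot protection",
--         "ddos protection",
--         "challenge-form"
--     ]
--
--     content_lower = content.lower()
--     return any(indicator in content_lower for indicator in blocked_indicators)
-- ===== SOURCE B (Python) =====
-- # Indicators grouped by their first character: at each position we only test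
-- # the few indicators that could possibly start there.
-- _BY_FIRST = {
--     "a": ["access denied"],
--     "b": ["bot protection"],
--     "c": ["cloudflare", "checking your browser", "challenge-form"],
--     "d": ["ddos protection"],
--     "e": ["enable javascript and cookies"],
--     "r": ["request could not be satisfied", "ray id:"],
--     "s": ["security check"],
-- }
--
--
-- def _is_blocked_content(content: str) -> bool:
--     """Detect if page is showing anti-bot protection"""
--     text = content.lower()
--     for i, ch in enumerate(text):
--         for ind in _BY_FIRST.get(ch, []):
--             if text.startswith(ind, i):
--                 return True
--     return False
-- ===== Notes on version B (the rewrite author's own statement) =====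
-- stated objective: alternative
-- what changed: B indexes the indicators in a dict keyed by first character and makes one positional pass over the lowered text, testing at each position only the indicators whose first letter matches, instead of ten independent full substring-membership searches.
import Mathlib
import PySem

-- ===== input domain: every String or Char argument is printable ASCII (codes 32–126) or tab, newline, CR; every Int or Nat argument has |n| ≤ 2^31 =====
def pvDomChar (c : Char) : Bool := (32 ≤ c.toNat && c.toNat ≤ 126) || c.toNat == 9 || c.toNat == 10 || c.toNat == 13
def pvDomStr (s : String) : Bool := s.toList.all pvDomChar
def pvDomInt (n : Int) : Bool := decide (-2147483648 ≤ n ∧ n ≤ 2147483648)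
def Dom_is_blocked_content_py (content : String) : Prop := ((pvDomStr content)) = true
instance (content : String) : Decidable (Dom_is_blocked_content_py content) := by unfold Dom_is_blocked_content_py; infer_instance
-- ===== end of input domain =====

-- B replaces A's ten independent substring searches by a single positional pass over the lowered
-- text with a dict dispatching on the first character to the few indicators that can start there
-- (alternative decomposition, same cost).

-- ===== PORT A =====
-- A's local list of indicators
def blocked_indicators : List String :=
  ["cloudflare", "access denied", "checking your browser", "enable javascript and cookies",
   "request could not be satisfied", "ray id:", "security check", "bot protection",
   "ddos protection", "challenge-form"]

def is_blocked_content_py (content : String) : Bool :=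
  let content_lower := PySem.Str.lower content
  blocked_indicators.any (fun indicator => PySem.Str.isIn indicator content_lower)

-- ===== PORT B =====
-- B's module-level dict: indicators grouped by their first character
def pvByFirst : PySem.Dict Char (List String) :=
  PySem.Dict.ofList
    [('a', ["access denied"]),
     ('b', ["bot protection"]),
     ('c', ["cloudflare", "checking your browser", "challenge-form"]),
     ('d', ["ddos protection"]),
     ('e', ["enable javascript and cookies"]),
     ('r', ["request could not be satisfied", "ray id:"]),
     ('s', ["security check"])]

-- the 'for i, ch in enumerate(text)' loop with early return; 'text.startswith(ind, i)' is the
-- prefix test of the current suffix (ported by hand, exact: startswith with offset i on text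
-- equals startswith on text[i:], and the recursion walks the suffixes in order)
def pvScan : List Char → Bool
  | [] => false
  | ch :: rest =>
      (pvByFirst.getD ch []).any (fun ind => PySem.Chars.startswith (ch :: rest) ind.toList)
        || pvScan rest

def is_blocked_content_py_alt (content : String) : Bool :=
  pvScan (PySem.Chars.lower content.toList)

-- ===== PRECONDITION & SPEC =====
def Spec_is_blocked_content_py (content : String) (out : Bool) : Prop := out = is_blocked_content_py_alt content
instance (content : String) (out : Bool) : Decidable (Spec_is_blocked_content_py content out) := by unfold Spec_is_blocked_content_py; infer_instance

-- ===== CLAIM (what is proved, stated in full; the proofs are below) =====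
def Claim_equal_is_blocked_content_py : Prop := ∀ (content : String), Dom_is_blocked_content_py content → Spec_is_blocked_content_py content (is_blocked_content_py content)

-- ===== LEMMAS AND PROOFS =====

-- closed form of the first-character dispatch table
theorem pvGetD_eq (c : Char) :
    pvByFirst.getD c [] =
      if c = 's' then ["security check"]
      else if c = 'r' then ["request could not be satisfied", "ray id:"]
      else if c = 'e' then ["enable javascript and cookies"]
      else if c = 'd' then ["ddos protection"]
      else if c = 'c' then ["cloudflare", "checking your browser", "challenge-form"]
      else if c = 'b' then ["bot protection"]
      else if c = 'a' then ["access denied"]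
      else [] := by
  simp [pvByFirst, PySem.Dict.ofList, PySem.Dict.update, PySem.Dict.getD_insert]

-- at a fixed position, dispatching on the first character finds a matching indicator
-- iff some indicator of the full list is a prefix there
theorem pv_dispatch_iff (c : Char) (rest : List Char) :
    ((pvByFirst.getD c []).any (fun ind => PySem.Chars.startswith (c :: rest) ind.toList)) = true
      ↔ ∃ ind ∈ blocked_indicators, ind.toList <+: c :: rest := by
  rw [pvGetD_eq]
  constructor
  · intro h
    split_ifs at h with h1 h2 h3 h4 h5 h6 h7 <;>
      (simp only [List.any_eq_true, PySem.Chars.startswith_iff] at h;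
       obtain ⟨ind, hmem, hp⟩ := h;
       exact ⟨ind, by fin_cases hmem <;> simp [blocked_indicators], hp⟩)
  · rintro ⟨ind, hmem, hp⟩
    fin_cases hmem <;>
      · simp [List.cons_prefix_cons] at hp
        obtain ⟨rfl, hp'⟩ := hp
        simp [PySem.Chars.startswith_iff, List.cons_prefix_cons, hp']

-- pvScan finds a match iff some indicator is an infix
theorem pvScan_iff (l : List Char) :
    pvScan l = true ↔ ∃ ind ∈ blocked_indicators, ind.toList <:+: l := by
  induction l with
  | nil =>
    simp only [pvScan]
    constructor
    · intro h; cases h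
    · rintro ⟨ind, hmem, hinf⟩
      have := hinf.sublist.length_le
      fin_cases hmem <;> simp at this
  | cons c rest ih =>
    simp only [pvScan, Bool.or_eq_true, ih, pv_dispatch_iff]
    constructor
    · rintro (⟨ind, hmem, hp⟩ | ⟨ind, hmem, hinf⟩)
      · exact ⟨ind, hmem, hp.isInfix⟩
      · exact ⟨ind, hmem, hinf.trans (List.suffix_cons c rest).isInfix⟩
    · rintro ⟨ind, hmem, hinf⟩
      rcases (List.infix_cons_iff).mp hinf with hp | hinf'
      · exact Or.inl ⟨ind, hmem, hp⟩
      · exact Or.inr ⟨ind, hmem, hinf'⟩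

theorem is_blocked_content_py_eq (content : String) :
    is_blocked_content_py content = is_blocked_content_py_alt content := by
  rw [Bool.eq_iff_iff]
  simp only [is_blocked_content_py, is_blocked_content_py_alt, List.any_eq_true,
    PySem.Str.isIn_iff_infix, PySem.Str.toList_lower, pvScan_iff]

-- ===== VERDICT (by name: the statement is the Claim_ definition above) =====
theorem is_blocked_content_py_spec : Claim_equal_is_blocked_content_py := by
  intro content _
  exact is_blocked_content_py_eq content
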